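-- pv_equiv track=rewrite | github.com/ekaterinakrylovao/small-tasks | module_1/special_palindrome/palindrome_utils.py | is_palindrome_descendant
-- ===== SOURCE A (Python) =====
-- def is_palindrome_descendant(n: int) -> bool:
--     """
--     Проверяет, является ли число палиндромом или один из его потомков является палиндромом.
--
--     Потомок создается путём суммирования каждой пары соседних цифр.
--
--     Пример:
--     - is_palindrome_descendant(11211230) -> True (11211230 -> 2333 -> 56 -> 11)
--     - is_palindrome_descendant(13001120) -> True (13001120 -> 4022 -> 44)
--     - is_palindrome_descendant(23336014) -> True (23336014 -> 5665)
--     - is_palindrome_descendant(11) -> True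
--
--     :param n: Исходное число.
--     :return: True, если число или его потомок является палиндромом, иначе False.
--     """
--     if not isinstance(n, int) or n < 0:
--         raise ValueError("Число должно быть положительным целым")
--
--     def is_palindrome(s: str) -> bool:
--         return s == s[::-1]
--
--     num_str = str(n)
--     while len(num_str) > 1:
--         if is_palindrome(num_str):
--             return True
--
--         if len(num_str) % 2 != 0:
--             break  # Если нечетное количество цифр, дальнейшее преобразование невозможно
--
--         num_str = "".join(str(int(num_str[i]) + int(num_str[i + 1])) for i in range(0, len(num_str), 2))
--
--     return False
-- ===== SOURCE B (Python) =====
-- def is_palindrome_descendant(n: int) -> bool: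
--     if not isinstance(n, int) or n < 0:
--         raise ValueError("Число должно быть положительным целым")
--
--     def digits(m):
--         # decimal digits of m, most significant first, as ints
--         ds = []
--         while m >= 10:
--             ds.append(m % 10)
--             m //= 10
--         ds.append(m)
--         ds.reverse()
--         return ds
--
--     def go(d):
--         if len(d) <= 1:
--             return False
--         if d == d[::-1]:
--             return True
--         if len(d) % 2 != 0:
--             return False
--         nxt = []
--         for i in range(0, len(d), 2):
--             nxt.extend(digits(d[i] + d[i + 1]))
--         return go(nxt)
--
--     return go(digits(n))
-- ===== Notes on version B (the rewrite author's own statement) =====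
-- stated objective: alternative
-- what changed: B replaces A's string processing (str/int conversions on characters, string slicing, string joins) by recursion on lists of integer digits computed arithmetically by repeated division; the palindrome test and the pair-sum descendant are done on int lists, no strings are built after the initial number decomposition.
import Mathlib
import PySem

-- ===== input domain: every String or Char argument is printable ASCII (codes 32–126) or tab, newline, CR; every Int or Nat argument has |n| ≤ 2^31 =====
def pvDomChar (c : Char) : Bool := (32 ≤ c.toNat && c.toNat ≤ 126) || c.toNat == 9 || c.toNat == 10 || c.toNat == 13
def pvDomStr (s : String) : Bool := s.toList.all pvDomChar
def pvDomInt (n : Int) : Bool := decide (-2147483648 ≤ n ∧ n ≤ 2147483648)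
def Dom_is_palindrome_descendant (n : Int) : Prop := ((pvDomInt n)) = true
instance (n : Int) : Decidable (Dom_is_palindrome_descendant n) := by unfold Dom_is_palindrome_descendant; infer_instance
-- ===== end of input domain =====

-- B replaces A's string processing (str/int conversions, string slicing) by recursion on
-- lists of integer digits computed arithmetically by repeated division; same value.
-- Both loop ports run on a fuel of 2*len+2 steps, which only makes the same computation
-- total (each step either halves the length or lowers the digit sum by at least 9).

-- ===== PORT A =====
-- A's is_palindrome:  s == s[::-1]
def pyPal (s : List Char) : Bool := s == (PySem.List.slice? s none none (-1)).getD []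

-- A's pair-sum descendant: "".join(str(int(s[i]) + int(s[i+1])) for i in range(0, len(s), 2))
def pairDesc (s : List Char) : List Char :=
  PySem.Chars.join []
    ((PySem.List.pyRange 0 (s.length : Int) 2).map (fun i =>
      PySem.Int.toChars ((PySem.Int.ofChars? [PySem.List.pyGetD s i ' ']).getD 0
                       + (PySem.Int.ofChars? [PySem.List.pyGetD s (i + 1) ' ']).getD 0)))

-- A's while loop: check palindrome, break on odd length, else continue with the descendant
def aLoop : Nat → List Char → Bool
  | 0, _ => false
  | fuel + 1, s =>
    if s.length > 1 then
      if pyPal s then true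
      else if s.length % 2 ≠ 0 then false
      else aLoop fuel (pairDesc s)
    else false

def is_palindrome_descendant (n : Int) : Bool :=
  aLoop (2 * (PySem.Int.toChars n).length + 2) (PySem.Int.toChars n)

-- ===== PORT B =====
-- B's digits(m): collect m % 10 while m >= 10, append the final m, reverse
def digLoop (m : Nat) (ds : List Nat) : List Nat :=
  if 10 ≤ m then digLoop (m / 10) (ds ++ [m % 10]) else (ds ++ [m]).reverse
  termination_by m
  decreasing_by exact Nat.div_lt_self (by omega) (by omega)

def bDigits (m : Nat) : List Nat := digLoop m []

-- B's for loop: nxt.extend(digits(d[i] + d[i+1])) for i in range(0, len(d), 2)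
def bNext (d : List Nat) : List Nat :=
  (PySem.List.pyRange 0 (d.length : Int) 2).foldl
    (fun nxt i => nxt ++ bDigits (PySem.List.pyGetD d i 0 + PySem.List.pyGetD d (i + 1) 0)) []

-- B's go: recursion on the digit list
def bGo : Nat → List Nat → Bool
  | 0, _ => false
  | fuel + 1, d =>
    if d.length ≤ 1 then false
    else if d == (PySem.List.slice? d none none (-1)).getD [] then true
    else if d.length % 2 ≠ 0 then false
    else bGo fuel (bNext d)

def is_palindrome_descendant_alt (n : Int) : Bool :=
  bGo (2 * (bDigits n.toNat).length + 2) (bDigits n.toNat)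

-- ===== PRECONDITION & SPEC =====
-- A raises ValueError on negative n (so does B); Pre_ excludes exactly those inputs.
def Pre_is_palindrome_descendant (n : Int) : Prop := 0 ≤ n
instance (n : Int) : Decidable (Pre_is_palindrome_descendant n) := by
  unfold Pre_is_palindrome_descendant; infer_instance
def pvWitness_is_palindrome_descendant : Int := (11211230)

def Spec_is_palindrome_descendant (n : Int) (out : Bool) : Prop := out = is_palindrome_descendant_alt n
instance (n : Int) (out : Bool) : Decidable (Spec_is_palindrome_descendant n out) := by unfold Spec_is_palindrome_descendant; infer_instance

-- ===== CLAIM =====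
def Claim_equal_is_palindrome_descendant : Prop := ∀ (n : Int), Dom_is_palindrome_descendant n → Pre_is_palindrome_descendant n → Spec_is_palindrome_descendant n (is_palindrome_descendant n)

-- ===== LEMMAS AND PROOFS =====

-- reference digit list (most significant first), used only by the proofs
def digs (m : Nat) : List Nat :=
  if 10 ≤ m then digs (m / 10) ++ [m % 10] else [m]
  termination_by m
  decreasing_by exact Nat.div_lt_self (by omega) (by omega)

theorem digLoop_eq (m : Nat) : ∀ ds, digLoop m ds = digs m ++ ds.reverse := by
  induction m using Nat.strong_induction_on with
  | _ m ih =>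
    intro ds
    rw [digLoop, digs]
    by_cases h : 10 ≤ m
    · simp only [h, if_true]
      rw [ih (m / 10) (Nat.div_lt_self (by omega) (by omega))]
      simp
    · simp [h]

theorem bDigits_eq (m : Nat) : bDigits m = digs m := by
  simp [bDigits, digLoop_eq]

theorem digs_lt (m : Nat) : ∀ d ∈ digs m, d < 10 := by
  induction m using Nat.strong_induction_on with
  | _ m ih =>
    rw [digs]
    by_cases h : 10 ≤ m
    · simp only [h, if_true]
      intro d hd
      rcases List.mem_append.mp hd with h1 | h1
      · exact ih (m / 10) (Nat.div_lt_self (by omega) (by omega)) d h1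
      · simp at h1; omega
    · simp [h]; omega

theorem toDigitsCore_eq (fuel : Nat) : ∀ n acc, n < fuel →
    Nat.toDigitsCore 10 fuel n acc = (digs n).map Nat.digitChar ++ acc := by
  induction fuel with
  | zero => intro n acc h; omega
  | succ f ih =>
    intro n acc h
    rw [Nat.toDigitsCore, digs]
    by_cases h10 : 10 ≤ n
    · have hne : ¬ n / 10 = 0 := by omega
      simp only [h10, if_true, hne, if_false]
      rw [ih (n / 10) _ (by omega)]
      simp
    · have he : n / 10 = 0 := by omega
      have hm : n % 10 = n := by omega
      simp [he, hm, h10]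

theorem toChars_eq (n : Int) (h : 0 ≤ n) :
    PySem.Int.toChars n = (digs n.toNat).map Nat.digitChar := by
  have : ¬ n < 0 := by omega
  simp only [PySem.Int.toChars, this, if_false, Nat.toDigits]
  rw [toDigitsCore_eq _ _ _ (Nat.lt_succ_self _)]
  simp

theorem ofChars_digitChar : ∀ a < 10, PySem.Int.ofChars? [Nat.digitChar a] = some (a : Int) := by
  decide

theorem digitChar_inj : ∀ a < 10, ∀ b < 10, Nat.digitChar a = Nat.digitChar b → a = b := by
  decide

theorem map_digitChar_inj : ∀ (xs ys : List Nat), (∀ d ∈ xs, d < 10) → (∀ d ∈ ys, d < 10) →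
    xs.map Nat.digitChar = ys.map Nat.digitChar → xs = ys := by
  intro xs
  induction xs with
  | nil => intro ys _ _ h; cases ys <;> simp_all
  | cons x xs ih =>
    intro ys hx hy h
    cases ys with
    | nil => simp_all
    | cons y ys =>
      simp only [List.map_cons, List.cons.injEq] at h
      have hxy := digitChar_inj x (hx x (by simp)) y (hy y (by simp)) h.1
      have := ih ys (fun d hd => hx d (by simp [hd])) (fun d hd => hy d (by simp [hd])) h.2
      simp [hxy, this]

theorem join_nil_flatten (ls : List (List Char)) : PySem.Chars.join [] ls = ls.flatten := by
  simp only [PySem.Chars.join, List.intercalate]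
  induction ls with
  | nil => rfl
  | cons h t ih =>
    cases t with
    | nil => simp
    | cons h2 t2 => simp [List.intersperse] at ih ⊢; exact ih

theorem pal_map (ds : List Nat) (hlt : ∀ d ∈ ds, d < 10) :
    pyPal (ds.map Nat.digitChar) = (ds == (PySem.List.slice? ds none none (-1)).getD []) := by
  rw [pyPal, PySem.List.slice?_none_none_neg_one, PySem.List.slice?_none_none_neg_one]
  simp only [Option.getD_some]
  rw [Bool.eq_iff_iff]
  simp only [beq_iff_eq]
  by_cases h : ds = ds.reverse
  · exact iff_of_true (by rw [← List.map_reverse, ← h]) h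
  · have hm : ¬ ds.map Nat.digitChar = (ds.map Nat.digitChar).reverse := by
      rw [← List.map_reverse]
      intro hc
      exact h (map_digitChar_inj ds ds.reverse hlt (fun d hd => hlt d (List.mem_reverse.mp hd)) hc)
    exact iff_of_false hm h

theorem pairDesc_map (ds : List Nat) (hlt : ∀ d ∈ ds, d < 10) (heven : ds.length % 2 = 0) :
    pairDesc (ds.map Nat.digitChar) = (bNext ds).map Nat.digitChar := by
  rw [pairDesc, bNext, PySem.List.foldl_append_eq_flatMap, join_nil_flatten]
  simp only [List.nil_append, List.flatMap_def, List.map_flatten, List.map_map, List.length_map]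
  refine congrArg List.flatten (List.map_congr_left ?_)
  intro i hi
  rcases (PySem.List.mem_pyRange_iff_of_pos (by omega) i).mp hi with ⟨hi0, hilen, hdvd⟩
  simp only [Function.comp_apply]
  have hi1 : i + 1 < (ds.length : Int) := by omega
  have h0 : i.toNat < ds.length := by omega
  have h1 : (i + 1).toNat < ds.length := by omega
  rw [PySem.List.pyGetD_eq_getElem _ _ hi0 (by simpa using hilen),
      PySem.List.pyGetD_eq_getElem _ _ (by omega) (by simpa using hi1),
      PySem.List.pyGetD_eq_getElem _ _ hi0 hilen,
      PySem.List.pyGetD_eq_getElem _ _ (by omega) hi1,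
      List.getElem_map, List.getElem_map]
  rw [ofChars_digitChar _ (hlt _ (List.getElem_mem h0)),
      ofChars_digitChar _ (hlt _ (List.getElem_mem h1))]
  simp only [Option.getD_some]
  have hcast : ((ds[i.toNat] : Nat) : Int) + ((ds[(i+1).toNat] : Nat) : Int)
      = ((ds[i.toNat] + ds[(i+1).toNat] : Nat) : Int) := by push_cast; ring
  rw [hcast, toChars_eq _ (by positivity), Int.toNat_natCast, bDigits_eq]

-- main loop correspondence
theorem bNext_lt (ds : List Nat) : ∀ d ∈ bNext ds, d < 10 := by
  intro d hd
  rw [bNext, PySem.List.foldl_append_eq_flatMap, List.nil_append] at hd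
  rcases List.mem_flatMap.mp hd with ⟨i, _, hmem⟩
  rw [bDigits_eq] at hmem
  exact digs_lt _ d hmem

theorem aLoop_eq_bGo (fuel : Nat) : ∀ ds, (∀ d ∈ ds, d < 10) →
    aLoop fuel (ds.map Nat.digitChar) = bGo fuel ds := by
  induction fuel with
  | zero => intro ds _; rfl
  | succ f ih =>
    intro ds hlt
    simp only [aLoop, bGo, List.length_map]
    by_cases hlen : ds.length ≤ 1
    · simp [hlen, show ¬ ds.length > 1 by omega]
    · simp only [show ds.length > 1 by omega, if_true, hlen, if_false]
      rw [pal_map ds hlt]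
      by_cases hp : (ds == (PySem.List.slice? ds none none (-1)).getD []) = true
      · simp [hp]
      · simp only [Bool.not_eq_true] at hp
        simp only [hp]
        by_cases hodd : ds.length % 2 ≠ 0
        · simp [hodd]
        · simp only [hodd, if_false]
          simp only [not_not] at hodd
          rw [pairDesc_map ds hlt hodd]
          exact ih _ (bNext_lt ds)

-- ===== VERDICT =====
theorem is_palindrome_descendant_spec : Claim_equal_is_palindrome_descendant := by
  intro n _ hpre
  unfold Spec_is_palindrome_descendant is_palindrome_descendant is_palindrome_descendant_alt
  rw [toChars_eq n hpre, bDigits_eq, List.length_map]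
  exact aLoop_eq_bGo _ _ (digs_lt _)
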